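-- pv_equiv track=rewrite | github.com/wheresjames/levv | levv/formats/utils.py | calcPriority
-- ===== SOURCE A (Python) =====
-- def calcPriority(s):
--     """Map keywords in *s* to a severity level (1 = critical … 6 = normal)."""
--     sl = s.lower()
--     if any(w in sl for w in ('fatal', 'critical', 'crit', 'error', 'err')):
--         return 1
--     if any(w in sl for w in ('warn', 'warning')):
--         return 2
--     if 'notice' in sl:
--         return 5
--     return 6
-- ===== SOURCE B (Python) =====
-- def calcPriority(s):
--     """Map keywords in *s* to a severity level (1 = critical ... 6 = normal)."""
--     table = {'fatal': 1, 'critical': 1, 'crit': 1, 'error': 1, 'err': 1,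
--              'warn': 2, 'warning': 2, 'notice': 5}
--     sl = s.lower()
--     hits = [lvl for w, lvl in table.items() if w in sl]
--     return min(hits) if hits else 6
-- ===== Notes on version B (the rewrite author's own statement) =====
-- stated objective: alternative
-- what changed: Replaces A's priority-ordered short-circuit branch chain with a table-driven pass: a keyword->level dict is scanned once, levels of all matching keywords are collected, and the minimum (default 6) is returned.
import Mathlib
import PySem

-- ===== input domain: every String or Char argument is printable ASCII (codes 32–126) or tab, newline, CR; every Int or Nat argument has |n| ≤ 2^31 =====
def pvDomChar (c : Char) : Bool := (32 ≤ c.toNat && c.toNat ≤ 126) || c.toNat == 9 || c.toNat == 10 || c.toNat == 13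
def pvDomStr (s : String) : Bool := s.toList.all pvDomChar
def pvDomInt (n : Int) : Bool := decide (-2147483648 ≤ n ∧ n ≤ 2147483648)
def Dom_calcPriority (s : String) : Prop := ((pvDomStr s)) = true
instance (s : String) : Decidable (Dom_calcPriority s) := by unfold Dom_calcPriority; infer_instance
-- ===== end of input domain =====

-- B replaces A's priority-ordered short-circuit branches with a keyword→level table scanned once, taking the minimum matched level (default 6); same return value everywhere.

-- ===== PORT A =====
def calcPriority (s : String) : Int :=
  let sl := PySem.Str.lower s
  if PySem.Str.isIn "fatal" sl || PySem.Str.isIn "critical" sl || PySem.Str.isIn "crit" sl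
     || PySem.Str.isIn "error" sl || PySem.Str.isIn "err" sl then 1
  else if PySem.Str.isIn "warn" sl || PySem.Str.isIn "warning" sl then 2
  else if PySem.Str.isIn "notice" sl then 5
  else 6

-- ===== PORT B =====
def pvTable : List (String × Int) :=
  [("fatal", 1), ("critical", 1), ("crit", 1), ("error", 1), ("err", 1),
   ("warn", 2), ("warning", 2), ("notice", 5)]

def calcPriority_alt (s : String) : Int :=
  let sl := PySem.Str.lower s
  let hits := pvTable.filterMap (fun p => if PySem.Str.isIn p.1 sl then some p.2 else none)
  match PySem.List.min? hits (fun x => x) with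
  | some m => m
  | none => 6

-- ===== PRECONDITION & SPEC =====
def Spec_calcPriority (s : String) (out : Int) : Prop := out = calcPriority_alt s
instance (s : String) (out : Int) : Decidable (Spec_calcPriority s out) := by unfold Spec_calcPriority; infer_instance

-- ===== CLAIM (what is proved, stated in full; the proofs are below) =====
def Claim_equal_calcPriority : Prop := ∀ (s : String), Dom_calcPriority s → Spec_calcPriority s (calcPriority s)

-- ===== LEMMAS AND PROOFS =====

-- ===== VERDICT (by name: the statement is the Claim_ definition above) =====
theorem calcPriority_spec : Claim_equal_calcPriority := by
  intro s _
  unfold Spec_calcPriority calcPriority calcPriority_alt pvTable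
  simp only [List.filterMap_cons, List.filterMap_nil]
  -- both sides depend on s only through the eight substring tests: abstract them and check all 2^8 cases
  generalize PySem.Str.isIn "fatal" (PySem.Str.lower s) = b1
  generalize PySem.Str.isIn "critical" (PySem.Str.lower s) = b2
  generalize PySem.Str.isIn "crit" (PySem.Str.lower s) = b3
  generalize PySem.Str.isIn "error" (PySem.Str.lower s) = b4
  generalize PySem.Str.isIn "err" (PySem.Str.lower s) = b5
  generalize PySem.Str.isIn "warn" (PySem.Str.lower s) = b6
  generalize PySem.Str.isIn "warning" (PySem.Str.lower s) = b7
  generalize PySem.Str.isIn "notice" (PySem.Str.lower s) = b8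
  revert b1 b2 b3 b4 b5 b6 b7 b8
  decide
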